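-- pv_equiv track=rewrite | github.com/petitepirate/interviewQuestions | q0121.py | k_palindrome
-- ===== SOURCE A (Python) =====
-- def k_palindrome(s, k):
--     # If s is already a palindrome, return true
--     if len(s) <= 1:
--         return True
--
--     # Get rid of matching ends
--     while s[0] == s[-1]:
--         s = s[1:-1]
--         if len(s) <= 1:
--             return True
--
--     if k == 0:
--         return False
--
--     # Try getting rid of the first and last character to see if we
--     # can make a palindrome by removing k - 1 chars.
--     return k_palindrome(s[:-1], k - 1) or k_palindrome(s[1:], k - 1)
-- ===== SOURCE B (Python) =====
-- def k_palindrome(s, k):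
--     # Interval DP: longest palindromic subsequence, then check len(s) - LPS <= k.
--     n = len(s)
--     prev = [0] * (n + 1)   # LPS of every length-0 substring
--     cur = [1] * n          # LPS of every length-1 substring
--     for length in range(2, n + 1):
--         prev, cur = cur, [
--             prev[i + 1] + 2 if s[i] == s[i + length - 1]
--             else max(cur[i], cur[i + 1])
--             for i in range(n - length + 1)
--         ]
--     return n - (cur[0] if n else 0) <= k
-- ===== Notes on version B (the rewrite author's own statement) =====
-- stated objective: alternative
-- what changed: Replaces A's try-both-ends branching recursion by a bottom-up interval dynamic program for the longest palindromic subsequence, returning len(s) - LPS(s) <= k.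
-- outside the precondition, e.g. on k_palindrome('ab', -1): A returns True, B returns False
import Mathlib
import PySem

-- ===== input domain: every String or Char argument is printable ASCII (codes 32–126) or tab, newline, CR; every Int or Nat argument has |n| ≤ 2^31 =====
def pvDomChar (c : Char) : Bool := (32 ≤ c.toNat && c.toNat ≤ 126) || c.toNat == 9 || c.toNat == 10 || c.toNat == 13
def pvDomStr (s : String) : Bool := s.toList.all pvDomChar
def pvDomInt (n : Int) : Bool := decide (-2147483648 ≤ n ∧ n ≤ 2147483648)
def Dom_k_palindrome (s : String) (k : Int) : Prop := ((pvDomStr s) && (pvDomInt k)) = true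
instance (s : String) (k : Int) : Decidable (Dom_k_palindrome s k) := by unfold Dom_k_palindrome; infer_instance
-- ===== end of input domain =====

-- B replaces A's try-both-ends branching recursion by a bottom-up interval DP for the
-- longest palindromic subsequence, checking len(s) - LPS(s) <= k (a different algorithm).


-- ===== PORT A =====
-- literal transliteration of A on List Char; Python's `while` loop is the first recursive
-- branch (Python re-checks `len(s) <= 1` after each trim, exactly as this re-entry does)
def kpalA (l : List Char) (k : Int) : Bool :=
  if _h : l.length ≤ 1 then true
  else if PySem.List.pyGet? l 0 = PySem.List.pyGet? l (-1) then
    kpalA (PySem.List.slice l (some 1) (some (-1))) k          -- s = s[1:-1]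
  else if k = 0 then false
  else kpalA (PySem.List.slice l none (some (-1))) (k - 1)     -- s[:-1]
       || kpalA (PySem.List.slice l (some 1) none) (k - 1)     -- s[1:]
termination_by l.length
decreasing_by
  · simp only [PySem.List.length_slice, PySem.List.clampIdx_neg_one]
    have : PySem.List.clampIdx l.length 1 = min 1 l.length := by
      simp
    omega
  · simp only [PySem.List.slice_to_neg_one, List.length_dropLast]; omega
  · simp only [PySem.List.slice_from_one, List.length_tail]; omega

def k_palindrome (s : String) (k : Int) : Bool := kpalA s.toList k

-- ===== PORT B =====
-- the body of B's inner list comprehension: one DP row (LPS of all substrings of size `length`)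
def kpStep (l : List Char) (n : Nat) (pc : List Int × List Int) (length : Int) :
    List Int × List Int :=
  (pc.2,
   (PySem.List.pyRange 0 ((n : Int) - length + 1) 1).map (fun i =>
      if PySem.List.pyGetD l i ' ' == PySem.List.pyGetD l (i + length - 1) ' ' then
        PySem.List.pyGetD pc.1 (i + 1) 0 + 2
      else
        max (PySem.List.pyGetD pc.2 i 0) (PySem.List.pyGetD pc.2 (i + 1) 0)))

def k_palindrome_alt (s : String) (k : Int) : Bool :=
  let l := s.toList
  let n := l.length
  let pc := (PySem.List.pyRange 2 ((n : Int) + 1) 1).foldl (kpStep l n)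
      (List.replicate (n + 1) (0 : Int), List.replicate n (1 : Int))
  decide ((n : Int) - (if n = 0 then 0 else PySem.List.pyGetD pc.2 0 0) ≤ k)

-- ===== PRECONDITION & SPEC =====
-- Pre_ excludes negative k (a removal budget, outside the function's natural domain), where
-- A's unconditional True is an accident of its recursion (the k == 0 stop is never reached);
-- B naturally returns False there.
def Pre_k_palindrome (_s : String) (k : Int) : Prop := 0 ≤ k
instance (s : String) (k : Int) : Decidable (Pre_k_palindrome s k) := by
  unfold Pre_k_palindrome; infer_instance

def pvWitness_k_palindrome : String × Int := ("abca", 1)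

def Spec_k_palindrome (s : String) (k : Int) (out : Bool) : Prop := out = k_palindrome_alt s k
instance (s : String) (k : Int) (out : Bool) : Decidable (Spec_k_palindrome s k out) := by
  unfold Spec_k_palindrome; infer_instance

-- ===== CLAIM (what is proved, stated in full; the proofs are below) =====
def Claim_equal_k_palindrome : Prop := ∀ (s : String) (k : Int),
  Dom_k_palindrome s k → Pre_k_palindrome s k → Spec_k_palindrome s k (k_palindrome s k)

-- ===== LEMMAS AND PROOFS =====

-- reference function: longest palindromic subsequence by the interval recurrence
def lps (l : List Char) : Nat :=
  if _h : l.length ≤ 1 then l.length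
  else if l.head? = l.getLast? then 2 + lps l.tail.dropLast
  else max (lps l.dropLast) (lps l.tail)
termination_by l.length
decreasing_by
  · simp only [List.length_dropLast, List.length_tail]; omega
  · simp only [List.length_dropLast]; omega
  · simp only [List.length_tail]; omega

theorem lps_small (xs : List Char) (h : xs.length ≤ 1) : lps xs = xs.length := by
  rw [lps, dif_pos h]

theorem lps_le (l : List Char) : lps l ≤ l.length := by
  fun_induction lps l with
  | case1 l h => omega
  | case2 l h hh ih =>
    simp only [List.length_dropLast, List.length_tail] at ih ⊢; omega
  | case3 l h hh ih1 ih2 =>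
    simp only [List.length_dropLast, List.length_tail] at ih1 ih2 ⊢; omega

theorem slice_one_neg_one (l : List Char) (h : 2 ≤ l.length) :
    PySem.List.slice l (some 1) (some (-1)) = l.tail.dropLast := by
  simp only [PySem.List.slice, PySem.List.clampIdx]
  norm_num
  rw [show ((l.length : Int) + -1).toNat = l.length - 1 by omega,
      show min 1 l.length = 1 by omega,
      List.dropLast_eq_take, List.length_tail, List.drop_one]
  simp [show l ≠ [] from by intro e; subst e; simp at h]

theorem A_char (l : List Char) (k : Int) (hk : 0 ≤ k) :
    kpalA l k = decide ((l.length : Int) - lps l ≤ k) := by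
  fun_induction kpalA l k with
  | case1 l k h =>
    rw [lps, dif_pos h]
    simp; omega
  | case2 l k h hh ih =>
    rw [PySem.List.pyGet?_zero, PySem.List.pyGet?_neg_one, ← List.head?_eq_getElem?] at hh
    rw [slice_one_neg_one l (by omega)]
    rw [slice_one_neg_one l (by omega)] at ih
    rw [ih hk]
    conv_rhs => rw [lps, dif_neg h, if_pos hh]
    have hlen : l.tail.dropLast.length = l.length - 2 := by
      simp only [List.length_dropLast, List.length_tail]
      omega
    rw [hlen]
    apply decide_eq_decide.mpr
    push_cast [Nat.cast_sub (by omega : 2 ≤ l.length)]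
    constructor <;> intro <;> omega
  | case3 l h hh =>
    rw [PySem.List.pyGet?_zero, PySem.List.pyGet?_neg_one, ← List.head?_eq_getElem?] at hh
    rw [lps, dif_neg h, if_neg hh]
    have h1 := lps_le l.dropLast
    have h2 := lps_le l.tail
    simp only [List.length_dropLast, List.length_tail] at h1 h2
    symm
    simp only [decide_eq_false_iff_not]
    have hm : max (lps l.dropLast) (lps l.tail) ≤ l.length - 1 := by
      apply max_le <;> omega
    intro hc
    have : (max (lps l.dropLast) (lps l.tail) : Int) ≤ (l.length : Int) - 1 := by
      exact_mod_cast by omega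
    omega
  | case4 l k h hh hk0 ih1 ih2 =>
    rw [PySem.List.pyGet?_zero, PySem.List.pyGet?_neg_one, ← List.head?_eq_getElem?] at hh
    rw [PySem.List.slice_to_neg_one, PySem.List.slice_from_one]
    rw [PySem.List.slice_to_neg_one] at ih1
    rw [PySem.List.slice_from_one] at ih2
    rw [ih1 (by omega), ih2 (by omega)]
    conv_rhs => rw [lps, dif_neg h, if_neg hh]
    rw [← Bool.decide_or]
    apply decide_eq_decide.mpr
    simp only [List.length_dropLast, List.length_tail]
    push_cast [Nat.cast_max]
    omega

-- one comprehension row of B is the next DP row of the lps recurrence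
theorem row_eq (l : List Char) (L : Nat) (hL : 1 ≤ L) (hLn : L + 1 ≤ l.length) (j : Nat)
    (hj : j < l.length - L) :
    (if PySem.List.pyGetD l (j : Int) ' ' == PySem.List.pyGetD l ((j : Int) + ((L : Int) + 1) - 1) ' ' then
        PySem.List.pyGetD ((List.range (l.length - (L - 1) + 1)).map
          (fun i => (lps ((l.drop i).take (L - 1)) : Int))) ((j : Int) + 1) 0 + 2
      else
        max (PySem.List.pyGetD ((List.range (l.length - L + 1)).map
              (fun i => (lps ((l.drop i).take L) : Int))) (j : Int) 0)
            (PySem.List.pyGetD ((List.range (l.length - L + 1)).map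
              (fun i => (lps ((l.drop i).take L) : Int))) ((j : Int) + 1) 0))
    = (lps ((l.drop j).take (L + 1)) : Int) := by
  have hjn : j < l.length := by omega
  have hjLn : j + L < l.length := by omega
  have e1 : PySem.List.pyGetD l (j : Int) ' ' = l[j] := by
    rw [PySem.List.pyGetD_natCast]; exact List.getD_eq_getElem l ' ' hjn
  have e2 : (j : Int) + ((L : Int) + 1) - 1 = ((j + L : Nat) : Int) := by push_cast; ring
  have e3 : PySem.List.pyGetD l ((j + L : Nat) : Int) ' ' = l[j + L] := by
    rw [PySem.List.pyGetD_natCast]; exact List.getD_eq_getElem l ' ' hjLn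
  have hsublen : ((l.drop j).take (L + 1)).length = L + 1 := by
    simp only [List.length_take, List.length_drop]; omega
  have hhead : ((l.drop j).take (L + 1)).head? = some l[j] := by
    rw [List.head?_eq_getElem?, List.getElem?_take, if_pos (by omega), List.getElem?_drop]
    simp [List.getElem?_eq_getElem hjn]
  have hlast : ((l.drop j).take (L + 1)).getLast? = some l[j + L] := by
    rw [List.getLast?_eq_getElem?, hsublen]
    rw [show L + 1 - 1 = L from rfl, List.getElem?_take, if_pos (by omega), List.getElem?_drop]
    simp [List.getElem?_eq_getElem hjLn]
  have hdl : ∀ (Y : List Char) (M : Nat), M ≤ Y.length → (Y.take M).dropLast = Y.take (M - 1) := by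
    intro Y M hM
    rw [List.dropLast_eq_take, List.length_take, List.take_take]
    congr 1; omega
  have htail : ((l.drop j).take (L + 1)).tail = (l.drop (j + 1)).take L := by
    rw [← List.drop_one, List.drop_take, List.drop_drop]
    norm_num [Nat.add_comm]
  have hDL : ((l.drop j).take (L + 1)).dropLast = (l.drop j).take L := by
    rw [hdl _ _ (by simp [List.length_drop]; omega)]
    norm_num
  have hmid : ((l.drop j).take (L + 1)).tail.dropLast = (l.drop (j + 1)).take (L - 1) := by
    rw [htail, hdl _ _ (by simp [List.length_drop]; omega)]
  have gmap : ∀ (f : Nat → Int) (m i : Nat), i < m →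
      PySem.List.pyGetD ((List.range m).map (fun t => f t)) (i : Int) 0 = f i := by
    intro f m i him
    rw [PySem.List.pyGetD_natCast, List.getD_eq_getElem _ _ (by simpa using him)]
    simp
  rw [e1, e2, e3]
  by_cases hc : l[j] = l[j + L]
  · rw [if_pos (by exact beq_iff_eq.mpr hc)]
    conv_rhs => rw [lps, dif_neg (by omega), if_pos (by rw [hhead, hlast, hc])]
    rw [hmid]
    rw [show (j : Int) + 1 = ((j + 1 : Nat) : Int) by push_cast; ring]
    rw [gmap _ _ _ (by omega)]
    push_cast; ring
  · rw [if_neg (by simp [hc])]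
    conv_rhs => rw [lps, dif_neg (by omega), if_neg (by rw [hhead, hlast]; simp [hc])]
    rw [hDL, htail]
    rw [show (j : Int) + 1 = ((j + 1 : Nat) : Int) by push_cast; ring]
    rw [gmap _ _ _ (by omega), gmap _ _ _ (by omega)]
    push_cast [Nat.cast_max]
    omega

-- loop invariant of B's fold: after processing sizes 2..L the state holds the two last DP rows
theorem fold_inv (l : List Char) (L : Nat) (hL : 1 ≤ L) (h2 : L ≤ l.length) :
    (PySem.List.pyRange 2 ((L : Int) + 1) 1).foldl (kpStep l l.length)
      (List.replicate (l.length + 1) (0 : Int), List.replicate l.length (1 : Int)) =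
    ((List.range (l.length - (L - 1) + 1)).map (fun i => (lps ((l.drop i).take (L - 1)) : Int)),
     (List.range (l.length - L + 1)).map (fun i => (lps ((l.drop i).take L) : Int))) := by
  induction L with
  | zero => omega
  | succ L ih =>
    by_cases hL1 : L = 0
    · subst hL1
      rw [show ((0 + 1 : Nat) : Int) + 1 = 2 by norm_num]
      rw [PySem.List.pyRange_one_eq_nil (by norm_num), List.foldl_nil]
      refine Prod.ext ?_ ?_
      · apply List.ext_getElem (by simp)
        intro i h1' h2'
        simp only [List.getElem_replicate, List.getElem_map, List.getElem_range]
        rw [show (0 + 1 - 1 : Nat) = 0 from rfl, List.take_zero, lps_small _ (by simp)]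
        simp
      · apply List.ext_getElem (by simp; omega)
        intro i h1' h2'
        simp only [List.getElem_replicate, List.getElem_map, List.getElem_range]
        rw [lps_small _ (by simp)]
        simp only [List.length_take, List.length_drop]
        simp only [List.length_map, List.length_range] at h2'
        rw [show min (0 + 1) (l.length - i) = 1 by omega]
        norm_num
    · have hL' : 1 ≤ L := by omega
      rw [show (((L + 1 : Nat)) : Int) + 1 = ((L : Int) + 1) + 1 by push_cast; ring]
      rw [PySem.List.pyRange_one_succ_right (by omega), List.foldl_append,
          ih hL' (by omega), List.foldl_cons, List.foldl_nil]
      unfold kpStep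
      refine Prod.ext ?_ ?_
      · simp only [Nat.add_sub_cancel]
      · rw [show ((l.length : Int) - ((L : Int) + 1) + 1) = ((l.length - L : Nat) : Int) by
              push_cast [Nat.cast_sub (show L ≤ l.length by omega)]; ring]
        rw [PySem.List.pyRange_zero, Int.toNat_natCast, List.map_map]
        rw [show l.length - (L + 1) + 1 = l.length - L by omega]
        apply List.map_congr_left
        intro j hj
        rw [List.mem_range] at hj
        exact row_eq l L hL' (by omega) j hj

theorem B_char (s : String) (k : Int) :
    k_palindrome_alt s k = decide ((s.toList.length : Int) - lps s.toList ≤ k) := by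
  have expand : k_palindrome_alt s k =
      decide (((s.toList.length : Nat) : Int) -
        (if s.toList.length = 0 then 0 else
          PySem.List.pyGetD
            ((PySem.List.pyRange 2 ((s.toList.length : Int) + 1) 1).foldl
              (kpStep s.toList s.toList.length)
              (List.replicate (s.toList.length + 1) (0 : Int),
               List.replicate s.toList.length (1 : Int))).2 0 0) ≤ k) := rfl
  rw [expand]
  by_cases h0 : s.toList.length = 0
  · rw [lps_small s.toList (by omega)]
    simp [h0]
  · rw [fold_inv s.toList s.toList.length (by omega) le_rfl]
    simp only [Nat.sub_self, h0, if_false]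
    rw [PySem.List.pyGetD_zero]
    simp
    rw [List.take_of_length_le (show s.toList.length ≤ s.length by simp)]

-- ===== VERDICT (by name: the statement is the Claim_ definition above) =====
theorem k_palindrome_spec : Claim_equal_k_palindrome := by
  intro s k _ hk
  unfold Spec_k_palindrome k_palindrome
  rw [A_char s.toList k hk, B_char s k]
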